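-- pv_equiv track=rewrite | github.com/12thfret/Brewlytics | Data Transformation Scripts/json_processing_tocsv.py | extract_additional_fields
-- ===== SOURCE A (Python) =====
-- from typing import Dict, List, Any
--
-- def extract_additional_fields(additional: Dict) -> Dict[str, Any]:
--     """Extract and standardize additional product attributes"""
--     processed = {}
--
--     # Coffee-specific fields
--     coffee_fields = {
--         'roast': extract_roast_level(additional),
--         'grind_size': extract_grind_size(additional),
--         'origin': extract_origin(additional),
--         'weight': extract_weight(additional),
--         'roast_date': additional.get('roast_date') or additional.get('roast _date')
--     }
--
--     # Equipment fields
--     equipment_fields = {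
--         'model': additional.get('model'),
--         'finish': additional.get('finish'),
--         'material_type': additional.get('material _type')
--     }
--
--     # Subscription/plan fields
--     subscription_fields = {
--         'subscription_plan': additional.get('subscription _plans'),
--         'quantity_per_month': additional.get('quantity _per _month')
--     }
--
--     processed.update({k: v for k, v in coffee_fields.items() if v})
--     processed.update({k: v for k, v in equipment_fields.items() if v})
--     processed.update({k: v for k, v in subscription_fields.items() if v})
--
--     return processed
--
-- def extract_roast_level(additional: Dict) -> str:
--     """Extract standardized roast level"""
--     roast_fields = ['roast', 'roast _level', 'roast_level']
--     for field in roast_fields: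
--         if additional.get(field):
--             roast = str(additional[field]).lower()
--             if 'light' in roast:
--                 return 'Light'
--             elif 'medium' in roast:
--                 return 'Medium'
--             elif 'dark' in roast:
--                 return 'Dark'
--             elif 'espresso' in roast:
--                 return 'Espresso'
--     return None
--
-- def extract_grind_size(additional: Dict) -> str:
--     """Extract grind size information"""
--     grind_fields = ['grind_size', 'grind _size', 'grind size']
--     for field in grind_fields:
--         if additional.get(field):
--             return str(additional[field])
--     return None
--
-- def extract_origin(additional: Dict) -> str:
--     """Extract coffee origin"""
--     origin_fields = ['origin', 'country', 'region']
--     for field in origin_fields: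
--         if additional.get(field):
--             return str(additional[field])
--     return None
--
-- def extract_weight(additional: Dict) -> str:
--     """Extract weight information"""
--     weight_fields = ['weight', 'size', 'pack _size']
--     for field in weight_fields:
--         if additional.get(field):
--             weight = str(additional[field])
--             # Standardize weight format
--             if 'kg' in weight.lower() or 'kilogram' in weight.lower():
--                 return weight
--             elif 'g' in weight.lower() or 'gram' in weight.lower():
--                 return weight
--     return None
-- ===== SOURCE B (Python) =====
-- # Table-driven re-implementation: one generic candidate scan over a spec table
-- # (output_key, candidate field names, transform) instead of per-field helper
-- # functions and three hand-built dicts.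
--
-- def _classify_roast(v):
--     r = v.lower()
--     for needle, label in (('light', 'Light'), ('medium', 'Medium'),
--                           ('dark', 'Dark'), ('espresso', 'Espresso')):
--         if needle in r:
--             return label
--     return None
--
-- def _ident(v):
--     return v
--
-- def _weight(v):
--     # every unit A accepts ('kg', 'kilogram', 'g', 'gram') contains 'g'
--     return v if 'g' in v.lower() else None
--
-- _SPECS = [
--     ('roast', ['roast', 'roast _level', 'roast_level'], _classify_roast),
--     ('grind_size', ['grind_size', 'grind _size', 'grind size'], _ident),
--     ('origin', ['origin', 'country', 'region'], _ident),
--     ('weight', ['weight', 'size', 'pack _size'], _weight),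
--     ('roast_date', ['roast_date', 'roast _date'], _ident),
--     ('model', ['model'], _ident),
--     ('finish', ['finish'], _ident),
--     ('material_type', ['material _type'], _ident),
--     ('subscription_plan', ['subscription _plans'], _ident),
--     ('quantity_per_month', ['quantity _per _month'], _ident),
-- ]
--
-- def extract_additional_fields(additional):
--     result = {}
--     for out_key, candidates, transform in _SPECS:
--         for field in candidates:
--             v = additional.get(field)
--             if v:
--                 t = transform(str(v))
--                 if t:
--                     result[out_key] = t
--                     break
--     return result
-- ===== Notes on version B (the rewrite author's own statement) =====
-- stated objective: simpler
-- what changed: Replaced the four per-field helper functions and three hand-built intermediate dicts (built, filtered by truthiness, then merged with update) by a single table-driven pass: one spec table (output key, candidate fields, transform) and one generic first-truthy-candidate scan that writes directly into the result dict.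
import Mathlib
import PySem

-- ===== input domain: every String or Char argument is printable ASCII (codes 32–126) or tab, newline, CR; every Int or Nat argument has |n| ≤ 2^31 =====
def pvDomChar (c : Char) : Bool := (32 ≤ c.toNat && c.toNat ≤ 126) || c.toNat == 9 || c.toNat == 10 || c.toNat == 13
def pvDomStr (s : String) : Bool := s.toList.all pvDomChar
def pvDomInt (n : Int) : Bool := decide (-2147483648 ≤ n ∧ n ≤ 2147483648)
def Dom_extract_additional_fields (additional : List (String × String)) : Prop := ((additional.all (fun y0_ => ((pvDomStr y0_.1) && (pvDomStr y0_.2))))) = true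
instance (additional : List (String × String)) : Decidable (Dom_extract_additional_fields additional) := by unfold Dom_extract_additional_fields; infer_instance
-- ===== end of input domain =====

-- B replaces A's per-field helpers and three intermediate dicts by one table-driven
-- scan over field specs (objective: simpler).  Values are strings, so Python's
-- str(...) on them is the identity and is ported as such.

-- ===== PORT A =====
-- additional.get(field) on the association-list dict (first match)
def pvGet (additional : List (String × String)) (k : String) : Option String :=
  (PySem.Dict.mk additional).get? k

-- 'for field in roast_fields: if additional.get(field): ... return ...' — loop over the fields
def pvRoastLoop (additional : List (String × String)) : List String → Option String
  | [] => none
  | f :: rest =>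
    match pvGet additional f with
    | some v =>
      if v ≠ "" then
        let roast := PySem.Str.lower v
        if PySem.Str.isIn "light" roast then some "Light"
        else if PySem.Str.isIn "medium" roast then some "Medium"
        else if PySem.Str.isIn "dark" roast then some "Dark"
        else if PySem.Str.isIn "espresso" roast then some "Espresso"
        else pvRoastLoop additional rest
      else pvRoastLoop additional rest
    | none => pvRoastLoop additional rest

def extract_roast_level (additional : List (String × String)) : Option String :=
  pvRoastLoop additional ["roast", "roast _level", "roast_level"]

def pvGrindLoop (additional : List (String × String)) : List String → Option String
  | [] => none
  | f :: rest =>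
    match pvGet additional f with
    | some v => if v ≠ "" then some v else pvGrindLoop additional rest
    | none => pvGrindLoop additional rest

def extract_grind_size (additional : List (String × String)) : Option String :=
  pvGrindLoop additional ["grind_size", "grind _size", "grind size"]

def pvOriginLoop (additional : List (String × String)) : List String → Option String
  | [] => none
  | f :: rest =>
    match pvGet additional f with
    | some v => if v ≠ "" then some v else pvOriginLoop additional rest
    | none => pvOriginLoop additional rest

def extract_origin (additional : List (String × String)) : Option String :=
  pvOriginLoop additional ["origin", "country", "region"]

def pvWeightLoop (additional : List (String × String)) : List String → Option String
  | [] => none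
  | f :: rest =>
    match pvGet additional f with
    | some v =>
      if v ≠ "" then
        if PySem.Str.isIn "kg" (PySem.Str.lower v) || PySem.Str.isIn "kilogram" (PySem.Str.lower v) then some v
        else if PySem.Str.isIn "g" (PySem.Str.lower v) || PySem.Str.isIn "gram" (PySem.Str.lower v) then some v
        else pvWeightLoop additional rest
      else pvWeightLoop additional rest
    | none => pvWeightLoop additional rest

def extract_weight (additional : List (String × String)) : Option String :=
  pvWeightLoop additional ["weight", "size", "pack _size"]

-- {k: v for k, v in d.items() if v} — keys are distinct, so the comprehension is the filtered item list
def pvDictComp : List (String × Option String) → List (String × String)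
  | [] => []
  | (k, ov) :: rest =>
    (match ov with
     | some v => if v ≠ "" then [(k, v)] else []
     | none => []) ++ pvDictComp rest

def extract_additional_fields (additional : List (String × String)) : List (String × String) :=
  -- coffee_fields
  let coffee_fields : PySem.Dict String (Option String) :=
    (((((PySem.Dict.empty.insert "roast" (extract_roast_level additional)).insert
        "grind_size" (extract_grind_size additional)).insert
        "origin" (extract_origin additional)).insert
        "weight" (extract_weight additional)).insert
        "roast_date"
        -- additional.get('roast_date') or additional.get('roast _date')
        (match pvGet additional "roast_date" with
         | some v => if v ≠ "" then some v else pvGet additional "roast _date"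
         | none => pvGet additional "roast _date"))
  -- equipment_fields
  let equipment_fields : PySem.Dict String (Option String) :=
    ((PySem.Dict.empty.insert "model" (pvGet additional "model")).insert
      "finish" (pvGet additional "finish")).insert
      "material_type" (pvGet additional "material _type")
  -- subscription_fields
  let subscription_fields : PySem.Dict String (Option String) :=
    (PySem.Dict.empty.insert "subscription_plan" (pvGet additional "subscription _plans")).insert
      "quantity_per_month" (pvGet additional "quantity _per _month")
  -- processed = {}; three processed.update({k: v ... if v}) calls (update = insert each pair)
  let processed : PySem.Dict String String := PySem.Dict.empty
  let processed := (pvDictComp coffee_fields.items).foldl (fun d kv => d.insert kv.1 kv.2) processed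
  let processed := (pvDictComp equipment_fields.items).foldl (fun d kv => d.insert kv.1 kv.2) processed
  let processed := (pvDictComp subscription_fields.items).foldl (fun d kv => d.insert kv.1 kv.2) processed
  processed.items

-- ===== PORT B =====
def pvClassifyRoast (v : String) : Option String :=
  let r := PySem.Str.lower v
  if PySem.Str.isIn "light" r then some "Light"
  else if PySem.Str.isIn "medium" r then some "Medium"
  else if PySem.Str.isIn "dark" r then some "Dark"
  else if PySem.Str.isIn "espresso" r then some "Espresso"
  else none

def pvIdent (v : String) : Option String := some v

def pvWeightT (v : String) : Option String :=
  if PySem.Str.isIn "g" (PySem.Str.lower v) then some v else none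

def pvSpecs : List (String × List String × (String → Option String)) :=
  [ ("roast", ["roast", "roast _level", "roast_level"], pvClassifyRoast),
    ("grind_size", ["grind_size", "grind _size", "grind size"], pvIdent),
    ("origin", ["origin", "country", "region"], pvIdent),
    ("weight", ["weight", "size", "pack _size"], pvWeightT),
    ("roast_date", ["roast_date", "roast _date"], pvIdent),
    ("model", ["model"], pvIdent),
    ("finish", ["finish"], pvIdent),
    ("material_type", ["material _type"], pvIdent),
    ("subscription_plan", ["subscription _plans"], pvIdent),
    ("quantity_per_month", ["quantity _per _month"], pvIdent) ]

-- inner 'for field in candidates: ... break' — first candidate whose value and transform are truthy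
def pvFindSpecVal (additional : List (String × String)) (tf : String → Option String) :
    List String → Option String
  | [] => none
  | f :: rest =>
    match pvGet additional f with
    | some v =>
      if v ≠ "" then
        match tf v with
        | some t => if t ≠ "" then some t else pvFindSpecVal additional tf rest
        | none => pvFindSpecVal additional tf rest
      else pvFindSpecVal additional tf rest
    | none => pvFindSpecVal additional tf rest

def extract_additional_fields_alt (additional : List (String × String)) : List (String × String) :=
  (pvSpecs.foldl
    (fun d s =>
      match pvFindSpecVal additional s.2.2 s.2.1 with
      | some t => d.insert s.1 t
      | none => d)
    (PySem.Dict.empty : PySem.Dict String String)).items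

-- ===== PRECONDITION & SPEC =====
def Spec_extract_additional_fields (additional : List (String × String)) (out : List (String × String)) : Prop := out = extract_additional_fields_alt additional
instance (additional : List (String × String)) (out : List (String × String)) : Decidable (Spec_extract_additional_fields additional out) := by unfold Spec_extract_additional_fields; infer_instance

-- ===== CLAIM (what is proved, stated in full; the proofs are below) =====
def Claim_equal_extract_additional_fields : Prop := ∀ (additional : List (String × String)), Dom_extract_additional_fields additional → Spec_extract_additional_fields additional (extract_additional_fields additional)

-- ===== LEMMAS AND PROOFS =====

-- A-side entry for one key (value filtered by truthiness), B-side entry for one key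
def pvEntA (k : String) (o : Option String) : List (String × String) :=
  match o with
  | some v => if v ≠ "" then [(k, v)] else []
  | none => []

def pvEntB (k : String) (o : Option String) : List (String × String) :=
  match o with
  | some t => [(k, t)]
  | none => []

theorem pvDictComp_nil : pvDictComp [] = [] := rfl

theorem pvDictComp_cons (k : String) (ov : Option String) (rest : List (String × Option String)) :
    pvDictComp ((k, ov) :: rest) = pvEntA k ov ++ pvDictComp rest := rfl

theorem pvEnt_roast (additional : List (String × String)) (k : String) (cands : List String) :
    pvEntA k (pvRoastLoop additional cands) = pvEntB k (pvFindSpecVal additional pvClassifyRoast cands) := by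
  induction cands with
  | nil => rfl
  | cons f rest ih =>
    simp only [pvRoastLoop, pvFindSpecVal]
    cases pvGet additional f with
    | none => exact ih
    | some v =>
      by_cases hv : v = ""
      · simp [hv, ih]
      · simp only [hv, if_pos, ne_eq, not_false_iff, pvClassifyRoast]
        split_ifs <;> simp_all [pvEntA, pvEntB]

theorem pvEnt_grind (additional : List (String × String)) (k : String) (cands : List String) :
    pvEntA k (pvGrindLoop additional cands) = pvEntB k (pvFindSpecVal additional pvIdent cands) := by
  induction cands with
  | nil => rfl
  | cons f rest ih =>
    simp only [pvGrindLoop, pvFindSpecVal, pvIdent]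
    cases pvGet additional f with
    | none => exact ih
    | some v =>
      by_cases hv : v = "" <;> simp_all [pvEntA, pvEntB]

theorem pvEnt_origin (additional : List (String × String)) (k : String) (cands : List String) :
    pvEntA k (pvOriginLoop additional cands) = pvEntB k (pvFindSpecVal additional pvIdent cands) := by
  induction cands with
  | nil => rfl
  | cons f rest ih =>
    simp only [pvOriginLoop, pvFindSpecVal, pvIdent]
    cases pvGet additional f with
    | none => exact ih
    | some v =>
      by_cases hv : v = "" <;> simp_all [pvEntA, pvEntB]

-- every unit substring A tests contains "g"
theorem pv_g_of_kg {w : String} (h : PySem.Str.isIn "kg" w = true) : PySem.Str.isIn "g" w = true := by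
  rw [PySem.Str.isIn_iff_infix] at h ⊢
  exact List.IsInfix.trans (by decide) h

theorem pv_g_of_kilogram {w : String} (h : PySem.Str.isIn "kilogram" w = true) : PySem.Str.isIn "g" w = true := by
  rw [PySem.Str.isIn_iff_infix] at h ⊢
  exact List.IsInfix.trans (by decide) h

theorem pv_g_of_gram {w : String} (h : PySem.Str.isIn "gram" w = true) : PySem.Str.isIn "g" w = true := by
  rw [PySem.Str.isIn_iff_infix] at h ⊢
  exact List.IsInfix.trans (by decide) h

theorem pvEnt_weight (additional : List (String × String)) (k : String) (cands : List String) :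
    pvEntA k (pvWeightLoop additional cands) = pvEntB k (pvFindSpecVal additional pvWeightT cands) := by
  induction cands with
  | nil => rfl
  | cons f rest ih =>
    simp only [pvWeightLoop, pvFindSpecVal, pvWeightT]
    cases pvGet additional f with
    | none => exact ih
    | some v =>
      by_cases hv : v = ""
      · simp [hv, ih]
      · by_cases hg : PySem.Str.isIn "g" (PySem.Str.lower v) = true
        · have h1 : (PySem.Str.isIn "kg" (PySem.Str.lower v) || PySem.Str.isIn "kilogram" (PySem.Str.lower v)) = true →
              pvEntA k (some v) = pvEntB k (some v) := by
            intro _; simp [pvEntA, pvEntB, hv]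
          simp only [hv, ne_eq, not_false_iff, if_true, hg]
          split_ifs <;> simp_all [pvEntA, pvEntB]
        · have hkg : PySem.Str.isIn "kg" (PySem.Str.lower v) = false := by
            cases h : PySem.Str.isIn "kg" (PySem.Str.lower v)
            · rfl
            · exact absurd (pv_g_of_kg h) hg
          have hkilo : PySem.Str.isIn "kilogram" (PySem.Str.lower v) = false := by
            cases h : PySem.Str.isIn "kilogram" (PySem.Str.lower v)
            · rfl
            · exact absurd (pv_g_of_kilogram h) hg
          have hgram : PySem.Str.isIn "gram" (PySem.Str.lower v) = false := by
            cases h : PySem.Str.isIn "gram" (PySem.Str.lower v)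
            · rfl
            · exact absurd (pv_g_of_gram h) hg
          have hg' : PySem.Str.isIn "g" (PySem.Str.lower v) = false := by
            cases h : PySem.Str.isIn "g" (PySem.Str.lower v)
            · rfl
            · exact absurd h hg
          simp at hkg hkilo hgram hg'
          simp [hv, hkg, hkilo, hgram, hg', ih]

theorem pvEnt_roast_date (additional : List (String × String)) (k : String) :
    pvEntA k
        (match pvGet additional "roast_date" with
         | some v => if v ≠ "" then some v else pvGet additional "roast _date"
         | none => pvGet additional "roast _date") =
      pvEntB k (pvFindSpecVal additional pvIdent ["roast_date", "roast _date"]) := by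
  simp only [pvFindSpecVal, pvIdent]
  cases pvGet additional "roast_date" with
  | none =>
    cases pvGet additional "roast _date" with
    | none => rfl
    | some u => by_cases hu : u = "" <;> simp_all [pvEntA, pvEntB]
  | some v =>
    by_cases hv : v = ""
    · cases pvGet additional "roast _date" with
      | none => simp [hv, pvEntA, pvEntB]
      | some u => by_cases hu : u = "" <;> simp_all [pvEntA, pvEntB]
    · simp [hv, pvEntA, pvEntB]

theorem pvEnt_single (additional : List (String × String)) (k c : String) :
    pvEntA k (pvGet additional c) = pvEntB k (pvFindSpecVal additional pvIdent [c]) := by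
  simp only [pvFindSpecVal, pvIdent]
  cases pvGet additional c with
  | none => rfl
  | some v => by_cases hv : v = "" <;> simp_all [pvEntA, pvEntB]

-- keys produced by pvDictComp / by the B-fold stay among the original keys
theorem pvDictComp_keys {l : List (String × Option String)} {kv : String × String}
    (h : kv ∈ pvDictComp l) : kv.1 ∈ l.map Prod.fst := by
  induction l with
  | nil => simp [pvDictComp] at h
  | cons p rest ih =>
    obtain ⟨k, ov⟩ := p
    rw [pvDictComp_cons] at h
    rcases List.mem_append.mp h with h1 | h2
    · cases ov with
      | none => simp [pvEntA] at h1
      | some v =>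
        simp only [pvEntA] at h1
        split_ifs at h1 <;> simp_all
    · exact List.mem_cons_of_mem _ (ih h2)

theorem pvDictComp_keys_sublist (l : List (String × Option String)) :
    List.Sublist ((pvDictComp l).map Prod.fst) (l.map Prod.fst) := by
  induction l with
  | nil => simp [pvDictComp]
  | cons p rest ih =>
    obtain ⟨k, ov⟩ := p
    rw [pvDictComp_cons]
    cases ov with
    | none => simpa [pvEntA] using ih.cons _
    | some v =>
      simp only [pvEntA]
      split_ifs
      · simpa using List.Sublist.cons₂ k ih
      · simpa using List.Sublist.cons k ih

-- folding fresh distinct keys into a dict appends the pairs (A-side update loops)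
theorem pvFoldInsert_items (l : List (String × String)) (d : PySem.Dict String String)
    (hfresh : ∀ kv ∈ l, d.contains kv.1 = false) (hnd : (l.map Prod.fst).Nodup) :
    (l.foldl (fun d kv => d.insert kv.1 kv.2) d).items = d.items ++ l := by
  have := PySem.Dict.items_foldl_insert_fresh (l := l) (k := Prod.fst) (v := Prod.snd) (d := d)
    hfresh hnd
  simpa using this

-- B-side fold: with fresh, distinct spec keys the result items are the concatenated entries
theorem pvBFold_items (additional : List (String × String))
    (sp : List (String × List String × (String → Option String))) (d : PySem.Dict String String)
    (hfresh : ∀ s ∈ sp, d.contains s.1 = false) (hnd : (sp.map Prod.fst).Nodup) :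
    (sp.foldl
      (fun d s =>
        match pvFindSpecVal additional s.2.2 s.2.1 with
        | some t => d.insert s.1 t
        | none => d) d).items =
    d.items ++ (sp.map (fun s => pvEntB s.1 (pvFindSpecVal additional s.2.2 s.2.1))).flatten := by
  induction sp generalizing d with
  | nil => simp
  | cons s rest ih =>
    simp only [List.foldl_cons, List.map_cons, List.flatten_cons]
    have hs : d.contains s.1 = false := hfresh s (List.mem_cons_self ..)
    have hnd' : (rest.map Prod.fst).Nodup := (List.nodup_cons.mp hnd).2
    have hs_notin : s.1 ∉ rest.map Prod.fst := (List.nodup_cons.mp hnd).1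
    have hfresh1 : ∀ s' ∈ rest, d.contains s'.1 = false :=
      fun s' hs' => hfresh s' (List.mem_cons_of_mem _ hs')
    cases hfs : pvFindSpecVal additional s.2.2 s.2.1 with
    | none =>
      rw [ih d hfresh1 hnd']
      simp [pvEntB]
    | some t =>
      have hfresh2 : ∀ s' ∈ rest, (d.insert s.1 t).contains s'.1 = false := by
        intro s' hs'
        rw [PySem.Dict.contains_insert]
        have h1 : (s'.1 == s.1) = false := by
          apply beq_false_of_ne
          intro hEq
          exact hs_notin (hEq ▸ List.mem_map_of_mem hs')
        rw [h1, hfresh s' (List.mem_cons_of_mem _ hs')]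
        rfl
      rw [ih (d.insert s.1 t) hfresh2 hnd']
      rw [PySem.Dict.items_insert_of_not_contains d t hs]
      simp [pvEntB]

-- the three groups' (key, optional value) lists, as A builds them
def pvCF (additional : List (String × String)) : List (String × Option String) :=
  [("roast", extract_roast_level additional),
   ("grind_size", extract_grind_size additional),
   ("origin", extract_origin additional),
   ("weight", extract_weight additional),
   ("roast_date",
     match pvGet additional "roast_date" with
     | some v => if v ≠ "" then some v else pvGet additional "roast _date"
     | none => pvGet additional "roast _date")]

def pvEQ (additional : List (String × String)) : List (String × Option String) :=
  [("model", pvGet additional "model"),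
   ("finish", pvGet additional "finish"),
   ("material_type", pvGet additional "material _type")]

def pvSB (additional : List (String × String)) : List (String × Option String) :=
  [("subscription_plan", pvGet additional "subscription _plans"),
   ("quantity_per_month", pvGet additional "quantity _per _month")]

theorem extract_additional_fields_eq (additional : List (String × String)) :
    extract_additional_fields additional = extract_additional_fields_alt additional := by
  -- A's three intermediate dicts have concrete distinct keys, so A's value is
  -- definitionally this triple fold of inserts
  have e1 : extract_additional_fields additional =
      ((pvDictComp (pvSB additional)).foldl (fun d kv => d.insert kv.1 kv.2)
        ((pvDictComp (pvEQ additional)).foldl (fun d kv => d.insert kv.1 kv.2)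
          ((pvDictComp (pvCF additional)).foldl (fun d kv => d.insert kv.1 kv.2)
            PySem.Dict.empty))).items := rfl
  -- step 1: coffee entries into the empty dict
  have hnd1 : ((pvDictComp (pvCF additional)).map Prod.fst).Nodup := by
    refine (pvDictComp_keys_sublist (pvCF additional)).nodup ?_
    simp [pvCF]
  have hd1 : ((pvDictComp (pvCF additional)).foldl (fun d kv => d.insert kv.1 kv.2)
      (PySem.Dict.empty : PySem.Dict String String)).items = pvDictComp (pvCF additional) := by
    rw [pvFoldInsert_items _ _ (fun kv _ => PySem.Dict.contains_empty kv.1) hnd1]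
    rfl
  -- step 2: equipment entries (keys disjoint from the coffee keys)
  have hnd2 : ((pvDictComp (pvEQ additional)).map Prod.fst).Nodup := by
    refine (pvDictComp_keys_sublist (pvEQ additional)).nodup ?_
    simp [pvEQ]
  have hcont1 : ∀ kv ∈ pvDictComp (pvEQ additional),
      (((pvDictComp (pvCF additional)).foldl (fun d kv => d.insert kv.1 kv.2)
        (PySem.Dict.empty : PySem.Dict String String))).contains kv.1 = false := by
    intro kv h
    have hkv : kv.1 ∈ (["model", "finish", "material_type"] : List String) := by
      simpa [pvEQ] using pvDictComp_keys h
    rw [PySem.Dict.contains_eq_decide_mem_keys]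
    simp only [PySem.Dict.keys, hd1]
    apply decide_eq_false
    intro hm
    have h1 : kv.1 ∈ (["roast", "grind_size", "origin", "weight", "roast_date"] : List String) := by
      have := (pvDictComp_keys_sublist (pvCF additional)).subset hm
      simpa [pvCF] using this
    simp only [List.mem_cons, List.not_mem_nil, or_false] at hkv h1
    rcases hkv with h | h | h <;> rw [h] at h1 <;> simp at h1
  have hd2 : ((pvDictComp (pvEQ additional)).foldl (fun d kv => d.insert kv.1 kv.2)
      ((pvDictComp (pvCF additional)).foldl (fun d kv => d.insert kv.1 kv.2)
        (PySem.Dict.empty : PySem.Dict String String))).items =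
      pvDictComp (pvCF additional) ++ pvDictComp (pvEQ additional) := by
    rw [pvFoldInsert_items _ _ hcont1 hnd2, hd1]
  -- step 3: subscription entries (keys disjoint from both earlier groups)
  have hnd3 : ((pvDictComp (pvSB additional)).map Prod.fst).Nodup := by
    refine (pvDictComp_keys_sublist (pvSB additional)).nodup ?_
    simp [pvSB]
  have hcont2 : ∀ kv ∈ pvDictComp (pvSB additional),
      (((pvDictComp (pvEQ additional)).foldl (fun d kv => d.insert kv.1 kv.2)
        ((pvDictComp (pvCF additional)).foldl (fun d kv => d.insert kv.1 kv.2)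
          (PySem.Dict.empty : PySem.Dict String String)))).contains kv.1 = false := by
    intro kv h
    have hkv : kv.1 ∈ (["subscription_plan", "quantity_per_month"] : List String) := by
      simpa [pvSB] using pvDictComp_keys h
    rw [PySem.Dict.contains_eq_decide_mem_keys]
    simp only [PySem.Dict.keys, hd2]
    apply decide_eq_false
    intro hm
    rw [List.map_append, List.mem_append] at hm
    have h1 : kv.1 ∈ (["roast", "grind_size", "origin", "weight", "roast_date"] : List String) ∨
        kv.1 ∈ (["model", "finish", "material_type"] : List String) := by
      rcases hm with hm | hm
      · exact Or.inl (by simpa [pvCF] using (pvDictComp_keys_sublist (pvCF additional)).subset hm)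
      · exact Or.inr (by simpa [pvEQ] using (pvDictComp_keys_sublist (pvEQ additional)).subset hm)
    simp only [List.mem_cons, List.not_mem_nil, or_false] at hkv h1
    rcases hkv with h | h <;> rw [h] at h1 <;> rcases h1 with h1 | h1 <;> simp at h1
  have hA : extract_additional_fields additional =
      (pvDictComp (pvCF additional) ++ pvDictComp (pvEQ additional)) ++ pvDictComp (pvSB additional) := by
    rw [e1, pvFoldInsert_items _ _ hcont2 hnd3, hd2]
  -- B's fold over the spec table appends one entry per spec
  have hB : extract_additional_fields_alt additional =
      (pvSpecs.map (fun s => pvEntB s.1 (pvFindSpecVal additional s.2.2 s.2.1))).flatten := by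
    unfold extract_additional_fields_alt
    rw [pvBFold_items additional pvSpecs PySem.Dict.empty
      (fun s _ => PySem.Dict.contains_empty s.1) (by decide)]
    rfl
  rw [hA, hB]
  -- expand both sides into per-key entries and rewrite each entry
  simp only [pvCF, pvEQ, pvSB, pvDictComp_cons, pvDictComp_nil, pvSpecs, List.map_cons,
    List.map_nil, List.flatten_cons, List.flatten_nil, List.append_assoc, List.append_nil,
    extract_roast_level, extract_grind_size, extract_origin, extract_weight]
  rw [pvEnt_roast, pvEnt_grind, pvEnt_origin, pvEnt_weight, pvEnt_roast_date,
    pvEnt_single additional "model" "model", pvEnt_single additional "finish" "finish",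
    pvEnt_single additional "material_type" "material _type",
    pvEnt_single additional "subscription_plan" "subscription _plans",
    pvEnt_single additional "quantity_per_month" "quantity _per _month"]

-- ===== VERDICT (by name: the statement is the Claim_ definition above) =====
theorem extract_additional_fields_spec : Claim_equal_extract_additional_fields := by
  intro additional _
  unfold Spec_extract_additional_fields
  exact extract_additional_fields_eq additional
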